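-- pv_equiv track=rewrite | github.com/Barrenjoey/Blackjack | BlackJack.py | ace
-- ===== SOURCE A (Python) =====
-- def ace(cards, dealer, count, dealer_count):
-- 	aces = ["Ac","Ah","As","Ad"]
-- 	for a in aces:
-- 		if a in cards and count > 21:
-- 			count -= 10
-- 		if a in dealer and dealer_count > 21:
-- 			dealer_count -= 10
-- 	return count, dealer_count
-- ===== SOURCE B (Python) =====
-- def ace(cards, dealer, count, dealer_count):
-- 	aces = ["Ac", "Ah", "As", "Ad"]
-- 	n_c = sum(a in cards for a in aces)
-- 	n_d = sum(a in dealer for a in aces)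
-- 	while n_c > 0 and count > 21:
-- 		count -= 10
-- 		n_c -= 1
-- 	while n_d > 0 and dealer_count > 21:
-- 		dealer_count -= 10
-- 		n_d -= 1
-- 	return count, dealer_count
-- ===== Notes on version B (the rewrite author's own statement) =====
-- stated objective: simpler
-- what changed: B first counts how many of the four ace strings are present in each hand, then runs a separate drain loop per hand subtracting 10 while that hand busts, instead of interleaving membership tests with guard checks in one loop over the aces.
import Mathlib
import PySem

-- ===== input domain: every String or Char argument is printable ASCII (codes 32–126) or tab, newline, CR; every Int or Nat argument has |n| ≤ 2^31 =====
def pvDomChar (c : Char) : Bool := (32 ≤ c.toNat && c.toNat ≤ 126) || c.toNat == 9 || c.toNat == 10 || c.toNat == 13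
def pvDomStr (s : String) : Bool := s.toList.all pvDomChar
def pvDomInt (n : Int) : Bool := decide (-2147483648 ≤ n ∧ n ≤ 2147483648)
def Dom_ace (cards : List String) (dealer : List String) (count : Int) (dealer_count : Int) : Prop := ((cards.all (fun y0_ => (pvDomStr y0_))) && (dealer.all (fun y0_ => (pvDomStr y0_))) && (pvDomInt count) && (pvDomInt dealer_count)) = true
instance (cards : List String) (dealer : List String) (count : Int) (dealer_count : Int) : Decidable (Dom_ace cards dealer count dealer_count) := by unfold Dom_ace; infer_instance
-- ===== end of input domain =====

-- B separates the phases: it first counts the ace strings present in each hand, then drains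
-- 10 points per counted ace while that hand's score exceeds 21 (objective: simpler decomposition).

-- ===== PORT A =====
-- one loop over the four aces, updating both scores with interleaved guard checks
def ace (cards : List String) (dealer : List String) (count : Int) (dealer_count : Int) : Int × Int :=
  (["Ac", "Ah", "As", "Ad"] : List String).foldl
    (fun (st : Int × Int) a =>
      let c := if cards.contains a ∧ st.1 > 21 then st.1 - 10 else st.1
      let d := if dealer.contains a ∧ st.2 > 21 then st.2 - 10 else st.2
      (c, d))
    (count, dealer_count)

-- ===== PORT B =====
-- the 'while n > 0 and c > 21: c -= 10; n -= 1' drain loop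
def aceDrain : Nat → Int → Int
  | 0, c => c
  | n + 1, c => if c > 21 then aceDrain n (c - 10) else c

def ace_alt (cards : List String) (dealer : List String) (count : Int) (dealer_count : Int) : Int × Int :=
  let aces : List String := ["Ac", "Ah", "As", "Ad"]
  let nC := aces.countP (fun a => cards.contains a)
  let nD := aces.countP (fun a => dealer.contains a)
  (aceDrain nC count, aceDrain nD dealer_count)

-- ===== PRECONDITION & SPEC =====
def Spec_ace (cards : List String) (dealer : List String) (count : Int) (dealer_count : Int) (out : Int × Int) : Prop := out = ace_alt cards dealer count dealer_count
instance (cards : List String) (dealer : List String) (count : Int) (dealer_count : Int) (out : Int × Int) : Decidable (Spec_ace cards dealer count dealer_count out) := by unfold Spec_ace; infer_instance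

-- ===== CLAIM (what is proved, stated in full; the proofs are below) =====
def Claim_equal_ace : Prop := ∀ (cards : List String) (dealer : List String) (count : Int) (dealer_count : Int), Dom_ace cards dealer count dealer_count → Spec_ace cards dealer count dealer_count (ace cards dealer count dealer_count)

-- ===== LEMMAS AND PROOFS =====

-- A's pair-state fold splits into two independent single-hand folds
theorem ace_fold_pair (cards dealer : List String) (l : List String) :
    ∀ (c d : Int),
      l.foldl
        (fun (st : Int × Int) a =>
          let c' := if cards.contains a ∧ st.1 > 21 then st.1 - 10 else st.1
          let d' := if dealer.contains a ∧ st.2 > 21 then st.2 - 10 else st.2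
          (c', d')) (c, d)
      = (l.foldl (fun c a => if cards.contains a ∧ c > 21 then c - 10 else c) c,
         l.foldl (fun d a => if dealer.contains a ∧ d > 21 then d - 10 else d) d) := by
  induction l with
  | nil => intro c d; rfl
  | cons a t ih => intro c d; simp only [List.foldl_cons]; exact ih _ _

theorem aceDrain_of_le (n : Nat) (c : Int) (h : ¬ c > 21) : aceDrain n c = c := by
  cases n with
  | zero => rfl
  | succ m => simp [aceDrain, h]

-- the single-hand fold over a list of aces equals draining (number of aces present)
theorem ace_fold_drain (hand : List String) (l : List String) :
    ∀ (c : Int),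
      l.foldl (fun c a => if hand.contains a ∧ c > 21 then c - 10 else c) c
      = aceDrain (l.countP (fun a => hand.contains a)) c := by
  induction l with
  | nil => intro c; rfl
  | cons a t ih =>
    intro c
    rw [List.foldl_cons, List.countP_cons, ih]
    by_cases hm : a ∈ hand
    · by_cases hc : c > 21
      · simp [hm, hc, aceDrain]
      · simp [hm, hc, aceDrain_of_le _ _ hc]
    · simp [hm]

-- ===== VERDICT (by name: the statement is the Claim_ definition above) =====
theorem ace_spec : Claim_equal_ace := by
  intro cards dealer count dealer_count _
  unfold Spec_ace ace ace_alt
  rw [ace_fold_pair, ace_fold_drain, ace_fold_drain]
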